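-- pv_equiv track=rewrite | github.com/zenghui9977/FedCav | create_clients.py | seperate_major_mino
-- ===== SOURCE A (Python) =====
-- import itertools
--
-- def seperate_major_mino(maj_list, mino_list, user_num):
--     combination_for_node = list(itertools.product(maj_list, mino_list))
--     comb_length = len(combination_for_node)
--     label_table_list = []
--     for u in range(user_num):
--         temp = list(combination_for_node[u%comb_length])
--         label_table_list.append(temp)
--     return label_table_list
-- ===== SOURCE B (Python) =====
-- def seperate_major_mino(maj_list, mino_list, user_num):
--     n = len(mino_list)
--     L = len(maj_list) * n
--     return [[maj_list[(u % L) // n], mino_list[(u % L) % n]] for u in range(user_num)]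
-- ===== Notes on version B (the rewrite author's own statement) =====
-- stated objective: faster
-- what changed: B never materializes the maj x mino cartesian product: each user's pair is computed directly by index arithmetic (quotient/remainder of u mod |maj|*|mino|).
import Mathlib
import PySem

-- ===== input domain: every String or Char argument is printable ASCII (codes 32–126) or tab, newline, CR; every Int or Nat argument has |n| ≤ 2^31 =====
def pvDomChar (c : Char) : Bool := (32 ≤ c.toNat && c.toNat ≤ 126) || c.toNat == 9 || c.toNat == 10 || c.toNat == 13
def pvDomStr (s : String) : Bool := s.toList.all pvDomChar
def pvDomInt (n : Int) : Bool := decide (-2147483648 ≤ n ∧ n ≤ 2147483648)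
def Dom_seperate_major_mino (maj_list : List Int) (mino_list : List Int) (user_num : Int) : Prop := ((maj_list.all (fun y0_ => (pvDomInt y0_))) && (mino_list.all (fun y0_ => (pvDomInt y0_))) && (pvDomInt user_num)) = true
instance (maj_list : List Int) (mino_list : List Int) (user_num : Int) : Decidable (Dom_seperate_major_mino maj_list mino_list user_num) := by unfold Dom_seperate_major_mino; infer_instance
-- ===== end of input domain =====

-- B computes each pair by index arithmetic instead of materializing the maj×mino product (measured faster, asymptotic).


-- ===== PORT A =====
def seperate_major_mino (maj_list : List Int) (mino_list : List Int) (user_num : Int) : List (List Int) :=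
  -- combination_for_node = list(itertools.product(maj_list, mino_list))
  let combination_for_node : List (Int × Int) :=
    maj_list.flatMap (fun a => mino_list.map (fun b => (a, b)))
  let comb_length : Int := combination_for_node.length
  -- for u in range(user_num): temp = list(combination_for_node[u % comb_length]); append
  (PySem.List.pyRange 0 user_num 1).foldl (fun acc u =>
    acc ++ [match PySem.List.pyGet? combination_for_node (PySem.Int.mod u comb_length) with
            | some (a, b) => [a, b]
            | none => []]) []

-- ===== PORT B =====
def seperate_major_mino_alt (maj_list : List Int) (mino_list : List Int) (user_num : Int) : List (List Int) :=
  let n : Int := mino_list.length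
  let L : Int := maj_list.length * n
  (PySem.List.pyRange 0 user_num 1).map (fun u =>
    [PySem.List.pyGetD maj_list (PySem.Int.floordiv (PySem.Int.mod u L) n) 0,
     PySem.List.pyGetD mino_list (PySem.Int.mod (PySem.Int.mod u L) n) 0])

-- ===== PRECONDITION & SPEC =====
-- Pre_ excludes exactly the inputs where both Pythons raise ZeroDivisionError:
-- user_num > 0 with an empty maj_list or mino_list (u % 0 in A, // 0 or % 0 in B).
def Pre_seperate_major_mino (maj_list : List Int) (mino_list : List Int) (user_num : Int) : Prop :=
  user_num ≤ 0 ∨ (maj_list ≠ [] ∧ mino_list ≠ [])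
instance (maj_list : List Int) (mino_list : List Int) (user_num : Int) : Decidable (Pre_seperate_major_mino maj_list mino_list user_num) := by unfold Pre_seperate_major_mino; infer_instance
def pvWitness_seperate_major_mino : List Int × List Int × Int := ([1, 2], [3], 5)
def Spec_seperate_major_mino (maj_list : List Int) (mino_list : List Int) (user_num : Int) (out : List (List Int)) : Prop := out = seperate_major_mino_alt maj_list mino_list user_num
instance (maj_list : List Int) (mino_list : List Int) (user_num : Int) (out : List (List Int)) : Decidable (Spec_seperate_major_mino maj_list mino_list user_num out) := by unfold Spec_seperate_major_mino; infer_instance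

-- ===== CLAIM (what is proved, stated in full; the proofs are below) =====
def Claim_equal_seperate_major_mino : Prop := ∀ (maj_list : List Int) (mino_list : List Int) (user_num : Int), Dom_seperate_major_mino maj_list mino_list user_num → Pre_seperate_major_mino maj_list mino_list user_num → Spec_seperate_major_mino maj_list mino_list user_num (seperate_major_mino maj_list mino_list user_num)

-- ===== LEMMAS AND PROOFS =====

-- length of the cartesian product list
theorem prod_length (maj mino : List Int) :
    (maj.flatMap (fun a => mino.map (fun b => (a, b)))).length = maj.length * mino.length := by
  induction maj with
  | nil => simp
  | cons a t ih => simp [List.flatMap_cons, ih]; ring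

-- indexing the cartesian product list = index arithmetic
theorem prod_getElem? (maj mino : List Int) (k : Nat)
    (hk : k < maj.length * mino.length) :
    (maj.flatMap (fun a => mino.map (fun b => (a, b))))[k]? =
      some (maj[k / mino.length]!, mino[k % mino.length]!) := by
  induction maj generalizing k with
  | nil => simp at hk
  | cons a t ih =>
    have hn : 0 < mino.length := by
      rcases Nat.eq_zero_or_pos mino.length with h | h
      · simp [h] at hk
      · exact h
    rw [List.flatMap_cons]
    by_cases h : k < mino.length
    · rw [List.getElem?_append_left (by simpa using h)]
      have h0 : k / mino.length = 0 := Nat.div_eq_of_lt h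
      have h1 : k % mino.length = k := Nat.mod_eq_of_lt h
      rw [h0, h1]
      simp [List.getElem?_map, List.getElem!_eq_getElem?_getD, List.getElem?_eq_getElem h]
    · rw [Nat.not_lt] at h
      obtain ⟨j, rfl⟩ : ∃ j, k = mino.length + j := ⟨k - mino.length, by omega⟩
      have hlen : (mino.map (fun b => (a, b))).length = mino.length := by simp
      rw [List.getElem?_append_right (by omega)]
      have hj : j < t.length * mino.length := by
        simp at hk; rw [Nat.succ_mul] at hk; omega
      have := ih j hj
      rw [hlen, Nat.add_sub_cancel_left, this]
      have hd : (mino.length + j) / mino.length = j / mino.length + 1 := by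
        rw [Nat.add_comm, Nat.add_div_right _ hn]
      have hm : (mino.length + j) % mino.length = j % mino.length := by
        rw [Nat.add_comm, Nat.add_mod_right]
      rw [hd, hm]
      have hjd : j / mino.length < t.length := Nat.div_lt_of_lt_mul (by rw [Nat.mul_comm] at hj; exact hj)
      simp [List.getElem!_eq_getElem?_getD, List.getElem?_cons_succ,
            List.getElem?_eq_getElem hjd]

theorem seperate_major_mino_spec : Claim_equal_seperate_major_mino := by
  unfold Claim_equal_seperate_major_mino
  intro maj mino user_num _ hpre
  unfold Spec_seperate_major_mino seperate_major_mino seperate_major_mino_alt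
  rw [PySem.List.foldl_append_singleton_eq_map, List.nil_append]
  apply List.map_congr_left
  intro u hu
  have hu' := (PySem.List.mem_pyRange_one).mp hu
  rcases hpre with hle | ⟨hmaj, hmino⟩
  · omega
  have hm : 0 < maj.length := List.length_pos_iff.mpr hmaj
  have hn : 0 < mino.length := List.length_pos_iff.mpr hmino
  have hL : (0 : Int) < (maj.flatMap (fun a => mino.map (fun b => (a, b)))).length := by
    rw [prod_length]; push_cast; positivity
  have hLeq : ((maj.flatMap (fun a => mino.map (fun b => (a, b)))).length : Int)
      = (maj.length : Int) * (mino.length : Int) := by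
    rw [prod_length]; push_cast; ring
  set L : Int := (maj.length : Int) * (mino.length : Int) with hLdef
  have hmodL : PySem.Int.mod u ((maj.flatMap (fun a => mino.map (fun b => (a, b)))).length : Int)
      = u % L := by rw [PySem.Int.mod_eq_emod_of_pos hL, hLeq]
  have hL0 : (0 : Int) < L := by positivity
  have h0 : (0 : Int) ≤ u % L := Int.emod_nonneg u (by omega)
  have h1 : u % L < L := Int.emod_lt_of_pos u hL0
  set k : Nat := (u % L).toNat with hk
  have hcast : u % L = (k : Int) := by omega
  have hkb : k < maj.length * mino.length := by
    have : (k : Int) < (maj.length : Int) * (mino.length : Int) := by rw [← hcast]; exact h1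
    exact_mod_cast this
  have hmodL' : PySem.Int.mod u L = (k : Int) := by
    rw [PySem.Int.mod_eq_emod_of_pos hL0, hcast]
  rw [hmodL, hcast, PySem.List.pyGet?_natCast, prod_getElem? maj mino k hkb, hmodL',
      PySem.Int.floordiv_natCast, PySem.Int.mod_natCast,
      PySem.List.pyGetD_natCast, PySem.List.pyGetD_natCast]
  have hkd : k / mino.length < maj.length := Nat.div_lt_of_lt_mul (by rw [Nat.mul_comm] at hkb; exact hkb)
  have hkm : k % mino.length < mino.length := Nat.mod_lt _ hn
  simp [List.getD_eq_getElem?_getD, List.getElem?_eq_getElem hkd,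
        List.getElem?_eq_getElem hkm, List.getElem!_eq_getElem?_getD]
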